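-- pv_equiv track=rewrite | github.com/bartolo78/escala | logic_g4.py | _group_shifts_by_day
-- ===== SOURCE A (Python) =====
-- def _group_shifts_by_day(num_shifts, shifts):
--     shifts_by_day = {}
--     for s in range(num_shifts):
--         d = shifts[s]['day']
--         if d not in shifts_by_day:
--             shifts_by_day[d] = []
--         shifts_by_day[d].append(s)
--     return shifts_by_day
-- ===== SOURCE B (Python) =====
-- def _group_shifts_by_day(num_shifts, shifts):
--     days = [shifts[s]['day'] for s in range(num_shifts)]
--     return {d: [s for s in range(num_shifts) if days[s] == d]
--             for d in dict.fromkeys(days)}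
-- ===== Notes on version B (the rewrite author's own statement) =====
-- stated objective: alternative
-- what changed: Replaces the incremental dict-building loop (create-empty-then-append per index) by a declarative two-pass form: compute the day list once, dedup it in order with dict.fromkeys, and build each day's index list with a per-day filter comprehension.
import Mathlib
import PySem

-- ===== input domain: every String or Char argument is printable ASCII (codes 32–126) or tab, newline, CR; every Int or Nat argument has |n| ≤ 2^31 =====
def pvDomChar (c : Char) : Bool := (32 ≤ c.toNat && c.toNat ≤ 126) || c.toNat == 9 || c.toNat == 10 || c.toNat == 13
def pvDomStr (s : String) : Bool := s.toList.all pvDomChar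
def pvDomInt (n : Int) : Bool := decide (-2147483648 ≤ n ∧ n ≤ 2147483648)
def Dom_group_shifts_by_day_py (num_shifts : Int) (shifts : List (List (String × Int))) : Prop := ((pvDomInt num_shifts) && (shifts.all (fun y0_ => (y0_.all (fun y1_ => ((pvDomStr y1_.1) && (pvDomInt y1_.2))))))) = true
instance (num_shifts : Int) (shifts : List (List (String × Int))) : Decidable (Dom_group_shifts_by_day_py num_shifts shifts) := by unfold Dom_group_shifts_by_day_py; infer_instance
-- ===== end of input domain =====

-- B replaces A's incremental dict-building loop by a declarative two-pass form (day list,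
-- ordered dedup, per-day filter); equal output, no speed claim (objective: alternative).

-- ===== PORT A =====
-- shifts[s]['day'] : the .getD defaults are never reached under Pre_ (index in range, key present)
def pvDayA (shifts : List (List (String × Int))) (s : Int) : Int :=
  ((PySem.Dict.mk ((PySem.List.pyGet? shifts s).getD [])).get? "day").getD 0

def group_shifts_by_day_py (num_shifts : Int) (shifts : List (List (String × Int))) : List (Int × List Int) :=
  ((PySem.List.pyRange 0 num_shifts 1).foldl
    (fun acc s =>
      let d := pvDayA shifts s
      let acc' := if acc.contains d then acc else acc.insert d []
      acc'.modify d [] (fun l => l ++ [s]))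
    PySem.Dict.empty).items

-- ===== PORT B =====
def group_shifts_by_day_py_alt (num_shifts : Int) (shifts : List (List (String × Int))) : List (Int × List Int) :=
  -- shifts[s]['day'] as in Source B's first comprehension
  let days := (PySem.List.pyRange 0 num_shifts 1).map
    (fun s => ((PySem.Dict.mk ((PySem.List.pyGet? shifts s).getD [])).get? "day").getD 0)
  (PySem.List.dedup days).map
    (fun d => (d, (PySem.List.pyRange 0 num_shifts 1).filter
      (fun s => PySem.List.pyGetD days s 0 == d)))

-- ===== PRECONDITION & SPEC =====
-- Pre_: exactly where the Python returns — every index 0 ≤ s < num_shifts is in range and that dict has key 'day'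
def Pre_group_shifts_by_day_py (num_shifts : Int) (shifts : List (List (String × Int))) : Prop :=
  num_shifts ≤ (shifts.length : Int) ∧
    ∀ e ∈ shifts.take num_shifts.toNat, "day" ∈ e.map Prod.fst
instance (num_shifts : Int) (shifts : List (List (String × Int))) : Decidable (Pre_group_shifts_by_day_py num_shifts shifts) := by unfold Pre_group_shifts_by_day_py; infer_instance

def pvWitness_group_shifts_by_day_py : Int × (List (List (String × Int))) :=
  (2, [[("day", 1)], [("day", 2), ("kind", 0)]])

def Spec_group_shifts_by_day_py (num_shifts : Int) (shifts : List (List (String × Int))) (out : List (Int × List Int)) : Prop := out = group_shifts_by_day_py_alt num_shifts shifts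
instance (num_shifts : Int) (shifts : List (List (String × Int))) (out : List (Int × List Int)) : Decidable (Spec_group_shifts_by_day_py num_shifts shifts out) := by unfold Spec_group_shifts_by_day_py; infer_instance

-- ===== CLAIM (what is proved, stated in full; the proofs are below) =====
def Claim_equal_group_shifts_by_day_py : Prop := ∀ (num_shifts : Int) (shifts : List (List (String × Int))), Dom_group_shifts_by_day_py num_shifts shifts → Pre_group_shifts_by_day_py num_shifts shifts → Spec_group_shifts_by_day_py num_shifts shifts (group_shifts_by_day_py num_shifts shifts)

-- ===== LEMMAS AND PROOFS =====

-- A's loop body (ensure-key-then-append) is one Python-dict modify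
theorem pv_step_collapse (acc : PySem.Dict Int (List Int)) (k : Int) (s : Int) :
    (if acc.contains k then acc else acc.insert k []).modify k [] (fun l => l ++ [s])
      = acc.modify k [] (fun l => l ++ [s]) := by
  by_cases h : acc.contains k
  · simp [h]
  · have hk : acc.get? k = none := by
      rw [PySem.Dict.get?_eq_none_iff_not_mem_keys]
      rw [← PySem.Dict.contains_iff_mem_keys]
      simp [h]
    simp [h, PySem.Dict.modify, PySem.Dict.getD, hk, PySem.Dict.get?_insert_self,
      PySem.Dict.insert_insert_self]

theorem pv_main (num_shifts : Int) (shifts : List (List (String × Int))) :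
    group_shifts_by_day_py num_shifts shifts = group_shifts_by_day_py_alt num_shifts shifts := by
  set r : List Int := PySem.List.pyRange 0 num_shifts 1 with hr
  set day : Int → Int := pvDayA shifts with hd
  have hB : group_shifts_by_day_py_alt num_shifts shifts
      = (PySem.List.dedup (r.map day)).map
          (fun d => (d, r.filter (fun s => PySem.List.pyGetD (r.map day) s 0 == d))) := rfl
  have hA : group_shifts_by_day_py num_shifts shifts
      = (r.foldl
          (fun acc s =>
            let d := day s
            let acc' := if acc.contains d then acc else acc.insert d []
            acc'.modify d [] (fun l => l ++ [s]))
          PySem.Dict.empty).items := rfl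
  rw [hA, hB]
  -- A side: collapse the step, then fold over (day s, s) pairs
  have h1 : (r.foldl
      (fun acc s =>
        let d := day s
        let acc' := if acc.contains d then acc else acc.insert d []
        acc'.modify d [] (fun l => l ++ [s]))
      PySem.Dict.empty)
      = ((r.map (fun s => (day s, s))).foldl
          (fun acc p => acc.modify p.1 [] (fun l => l ++ [p.2])) PySem.Dict.empty) := by
    rw [List.foldl_map]
    apply PySem.List.foldl_congr_mem
    intro acc s _
    exact pv_step_collapse acc (day s) s
  rw [h1]
  set pairs : List (Int × Int) := r.map (fun s => (day s, s)) with hp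
  set D : PySem.Dict Int (List Int) :=
    pairs.foldl (fun acc p => acc.modify p.1 [] (fun l => l ++ [p.2])) PySem.Dict.empty with hD
  have hnodup : D.keys.Nodup := by
    rw [hD]
    exact PySem.Dict.nodup_keys_foldl_modify_key pairs Prod.fst []
      (fun d p => fun l => l ++ [p.2]) PySem.Dict.empty (by simp [PySem.Dict.empty])
  have hkeys : D.keys = PySem.Set.ofList (r.map day) := by
    rw [hD, PySem.Dict.keys_foldl_modify_key]
    simp [hp, List.map_map, PySem.Set.update_nil_left, PySem.Dict.empty, Function.comp_def]
  have hget : ∀ c : Int, D.getD c [] = r.filter (fun s => day s == c) := by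
    intro c
    rw [hD, PySem.Dict.getD_foldl_modify_append, hp, List.filter_map, List.map_map]
    simp [Function.comp_def]
  rw [PySem.Dict.items_eq_map_keys D hnodup [], hkeys, PySem.List.dedup_eq_ofList]
  apply List.map_congr_left
  intro c _
  refine Prod.ext rfl ?_
  rw [hget c]
  refine (List.filter_congr ?_).symm
  intro s hs
  rw [hr, PySem.List.mem_pyRange_one] at hs
  rw [hd, hr]
  rw [PySem.List.pyGetD_map_pyRange_of_nonneg (pvDayA shifts) num_shifts s 0 hs.1 hs.2]

-- ===== VERDICT (by name: the statement is the Claim_ definition above) =====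
theorem group_shifts_by_day_py_spec : Claim_equal_group_shifts_by_day_py := by
  intro num_shifts shifts _ _
  show _ = _
  exact pv_main num_shifts shifts
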